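-- pv_equiv track=rewrite | github.com/samansiddiqui55/ops-flow_with-slack- | backend/utils/message_cleaner.py | _drop_email_headers
-- ===== SOURCE A (Python) =====
-- _HEADER_PREFIXES = (
--     "from:", "to:", "cc:", "bcc:", "subject:", "date:", "sent:",
--     "reply-to:", "return-path:", "delivered-to:", "received:", "x-",
--     "content-type:", "mime-version:", "message-id:", "in-reply-to:",
--     "references:", "user-agent:", "thread-index:", "thread-topic:",
--     "list-unsubscribe:", "precedence:",
-- )
--
-- def _drop_email_headers(text: str) -> str:
--     """Strip leading lines that look like RFC822 headers."""
--     out = []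
--     in_header_block = True
--     for line in text.split("\n"):
--         if in_header_block:
--             stripped = line.strip().lower()
--             if not stripped:
--                 # blank line ends header block
--                 in_header_block = False
--                 continue
--             if stripped.startswith(_HEADER_PREFIXES):
--                 continue
--             # If first non-empty line doesn't look like a header, exit header mode
--             in_header_block = False
--         out.append(line)
--     return "\n".join(out)
-- ===== SOURCE B (Python) =====
-- _HEADER_PREFIXES = (
--     "from:", "to:", "cc:", "bcc:", "subject:", "date:", "sent:",
--     "reply-to:", "return-path:", "delivered-to:", "received:", "x-",
--     "content-type:", "mime-version:", "message-id:", "in-reply-to:",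
--     "references:", "user-agent:", "thread-index:", "thread-topic:",
--     "list-unsubscribe:", "precedence:",
-- )
--
-- def _drop_email_headers(text: str) -> str:
--     """Strip leading lines that look like RFC822 headers."""
--     lines = text.split("\n")
--     start = len(lines)
--     for i, line in enumerate(lines):
--         s = line.strip().lower()
--         if not s:
--             # blank line ends the header block; the blank itself is consumed
--             start = i + 1
--             break
--         if not s.startswith(_HEADER_PREFIXES):
--             # first non-header, non-blank line: body starts here
--             start = i
--             break
--     return "\n".join(lines[start:])
-- ===== Notes on version B (the rewrite author's own statement) =====
-- stated objective: simpler
-- what changed: Instead of scanning every line with a boolean in-header flag and appending each kept line, B loops only until the header/body boundary index is decided and returns one bulk slice-and-join of the tail.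
import Mathlib
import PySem

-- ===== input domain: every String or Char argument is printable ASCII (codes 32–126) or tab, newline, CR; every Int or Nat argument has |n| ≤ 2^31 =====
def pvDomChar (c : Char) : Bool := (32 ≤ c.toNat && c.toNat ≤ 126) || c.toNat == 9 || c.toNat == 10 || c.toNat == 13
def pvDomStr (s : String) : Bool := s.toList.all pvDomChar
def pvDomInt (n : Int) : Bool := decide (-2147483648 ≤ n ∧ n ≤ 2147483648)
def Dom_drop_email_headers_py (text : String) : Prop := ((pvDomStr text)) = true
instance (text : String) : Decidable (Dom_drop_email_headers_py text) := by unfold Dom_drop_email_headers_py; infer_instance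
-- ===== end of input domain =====

-- B computes the index where the leading header block ends and returns one slice+join,
-- instead of A's flag-driven per-line append loop: a simpler decomposition, same cost.

-- ===== PORT A =====
def pvHeaderPrefixes : List String :=
  ["from:", "to:", "cc:", "bcc:", "subject:", "date:", "sent:",
   "reply-to:", "return-path:", "delivered-to:", "received:", "x-",
   "content-type:", "mime-version:", "message-id:", "in-reply-to:",
   "references:", "user-agent:", "thread-index:", "thread-topic:",
   "list-unsubscribe:", "precedence:"]

-- one iteration of A's for-loop: state = (out, in_header_block)
def pvDropStepA (st : List String × Bool) (line : String) : List String × Bool :=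
  if st.2 then
    let stripped := PySem.Str.lower (PySem.Str.strip line)
    if stripped = "" then (st.1, false)
    else if pvHeaderPrefixes.any (fun p => PySem.Str.startswith stripped p) then (st.1, true)
    else (st.1 ++ [line], false)
  else (st.1 ++ [line], st.2)

def drop_email_headers_py (text : String) : String :=
  PySem.Str.join "\n" (((PySem.Str.split? text "\n").getD []).foldl pvDropStepA ([], true)).1

-- ===== PORT B =====
-- B's boundary loop: the index where the body starts (list length if never decided)
def pvFindStart : List String → Nat
  | [] => 0
  | line :: rest =>
    let s := PySem.Str.lower (PySem.Str.strip line)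
    if s = "" then 1
    else if ¬ (pvHeaderPrefixes.any (fun p => PySem.Str.startswith s p)) then 0
    else 1 + pvFindStart rest

def drop_email_headers_py_alt (text : String) : String :=
  let lines := (PySem.Str.split? text "\n").getD []
  PySem.Str.join "\n" (lines.drop (pvFindStart lines))

-- ===== PRECONDITION & SPEC =====
def Spec_drop_email_headers_py (text : String) (out : String) : Prop := out = drop_email_headers_py_alt text
instance (text : String) (out : String) : Decidable (Spec_drop_email_headers_py text out) := by unfold Spec_drop_email_headers_py; infer_instance

-- ===== CLAIM (what is proved, stated in full; the proofs are below) =====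
def Claim_equal_drop_email_headers_py : Prop := ∀ (text : String), Dom_drop_email_headers_py text → Spec_drop_email_headers_py text (drop_email_headers_py text)

-- ===== LEMMAS AND PROOFS =====
-- once the flag is false, A appends every remaining line
theorem pvFoldFalse (ls : List String) (out : List String) :
    (ls.foldl pvDropStepA (out, false)).1 = out ++ ls := by
  induction ls generalizing out with
  | nil => simp
  | cons l rest ih => simp [pvDropStepA, ih, List.append_assoc]

-- while the flag is true, A's result is the accumulator plus the tail from B's boundary
theorem pvFoldTrue (ls : List String) (out : List String) :
    (ls.foldl pvDropStepA (out, true)).1 = out ++ ls.drop (pvFindStart ls) := by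
  induction ls generalizing out with
  | nil => simp [pvFindStart]
  | cons l rest ih =>
    rw [List.foldl_cons]
    by_cases hb : PySem.Str.lower (PySem.Str.strip l) = ""
    · rw [show pvDropStepA (out, true) l = (out, false) from by simp [pvDropStepA, hb],
          pvFoldFalse, show pvFindStart (l :: rest) = 1 from by simp [pvFindStart, hb]]
      rfl
    · by_cases hp : (pvHeaderPrefixes.any fun p => PySem.Str.startswith (PySem.Str.lower (PySem.Str.strip l)) p) = true
      · rw [show pvDropStepA (out, true) l = (out, true) from by
              simp only [pvDropStepA, if_true]; rw [if_neg hb, if_pos hp],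
            ih, show pvFindStart (l :: rest) = 1 + pvFindStart rest from by
              simp only [pvFindStart]; rw [if_neg hb, if_neg (by simpa using hp)]]
        simp [Nat.add_comm 1 (pvFindStart rest)]
      · rw [show pvDropStepA (out, true) l = (out ++ [l], false) from by
              simp only [pvDropStepA, if_true]; rw [if_neg hb, if_neg hp],
            pvFoldFalse, show pvFindStart (l :: rest) = 0 from by
              simp only [pvFindStart]; rw [if_neg hb, if_pos (by simpa using hp)]]
        simp

-- ===== VERDICT (by name: the statement is the Claim_ definition above) =====
theorem drop_email_headers_py_spec : Claim_equal_drop_email_headers_py := by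
  intro text _
  unfold Spec_drop_email_headers_py drop_email_headers_py drop_email_headers_py_alt
  rw [pvFoldTrue]
  rfl
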